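-- pv_equiv track=rewrite | github.com/wrmem/RAMEN | ParserModules/half_duplex_finder.py | function
-- ===== SOURCE A (Python) =====
-- def function(device_output):
-- 	valid = "Ok"
-- 	comment = ""
-- 	fixit = ""
-- 	spurious = ""
-- 	rdy_int_details = False
--
-- 	device_lines = device_output.splitlines()
-- 	for i in device_lines:
-- 		if "line protocol" in i:
-- 			#Found an interface
-- 			line_items = i.split(" ")
-- 			int_name = line_items[0]
-- 			rdy_int_details = True
-- 			continue
-- 		if i.startswith(" ") and rdy_int_details:
-- 			#Search indented text for half-duplex
-- 			if "Half-duplex" in i: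
-- 				valid = "Failed"
-- 				if spurious == "":
-- 					spurious = int_name + " is in half-duplex mode"
-- 				else:
-- 					spurious = spurious + "\r\n" + int_name + " is in half-duplex mode"
-- 		else:
-- 			#Other output or didn't find duplex for this interface
-- 			rdy_int_details = False
--
-- 	if valid != "Ok":
-- 		valid = "Failed"
-- 		comment = "Half-duplex interfaces found"
-- 	return valid, comment, fixit, spurious
-- ===== SOURCE B (Python) =====
-- def function(device_output):
--     # Pass 1: segment the output into interface blocks (name, indented detail lines).
--     blocks = []
--     cur = None
--     for line in device_output.splitlines():
--         if "line protocol" in line: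
--             if cur is not None:
--                 blocks.append(cur)
--             cur = (line.split(" ")[0], [])
--         elif line.startswith(" ") and cur is not None:
--             cur[1].append(line)
--         else:
--             if cur is not None:
--                 blocks.append(cur)
--             cur = None
--     if cur is not None:
--         blocks.append(cur)
--     # Pass 2: collect one message per half-duplex detail line.
--     messages = [name + " is in half-duplex mode"
--                 for name, lines in blocks
--                 for l in lines if "Half-duplex" in l]
--     if messages:
--         return "Failed", "Half-duplex interfaces found", "", "\r\n".join(messages)
--     return "Ok", "", "", ""
-- ===== Notes on version B (the rewrite author's own statement) =====
-- stated objective: alternative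
-- what changed: Replaces A's single stateful scan (valid/spurious/rdy flags mutated per line, message string grown by conditional concatenation) with a two-pass pipeline: first segment the lines into (interface, indented-detail-lines) blocks, then derive the message list by a comprehension over the blocks and join it once with the CRLF separator.
import Mathlib
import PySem

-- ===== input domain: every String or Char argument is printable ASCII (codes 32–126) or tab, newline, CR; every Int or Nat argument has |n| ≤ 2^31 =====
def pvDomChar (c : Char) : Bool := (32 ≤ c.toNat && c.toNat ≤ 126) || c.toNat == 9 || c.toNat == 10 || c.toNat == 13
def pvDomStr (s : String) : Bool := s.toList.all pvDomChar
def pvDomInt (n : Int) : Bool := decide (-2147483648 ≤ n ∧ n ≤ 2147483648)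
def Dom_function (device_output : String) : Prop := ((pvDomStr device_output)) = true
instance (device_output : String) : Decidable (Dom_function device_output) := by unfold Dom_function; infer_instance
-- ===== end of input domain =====

-- B replaces A's single stateful scan with block segmentation followed by a comprehension
-- and a single '\r\n'-join (objective: alternative decomposition, same cost).
-- String work is ported on List Char via PySem.Chars (exact); results are rebuilt with String.ofList.

-- shared literal constants
def pvProto : List Char := "line protocol".toList
def pvHalf : List Char := "Half-duplex".toList
def pvSuffix : List Char := " is in half-duplex mode".toList
def pvCRLF : List Char := "\r\n".toList

-- ===== PORT A =====
-- the for-loop of A, carrying (valid, spurious, rdy_int_details, int_name)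
def pvLoopA : List (List Char) → List Char → List Char → Bool → List Char → List Char × List Char
  | [], valid, spurious, _, _ => (valid, spurious)
  | i :: rest, valid, spurious, rdy, intName =>
    if PySem.Chars.isIn pvProto i then
      pvLoopA rest valid spurious true ((PySem.Chars.splitOn i [' ']).headD [])
    else if PySem.Chars.startswith i [' '] && rdy then
      (if PySem.Chars.isIn pvHalf i then
        pvLoopA rest "Failed".toList
          (if spurious = [] then intName ++ pvSuffix else spurious ++ pvCRLF ++ intName ++ pvSuffix)
          rdy intName
      else
        pvLoopA rest valid spurious rdy intName)
    else
      pvLoopA rest valid spurious false intName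

def function (device_output : String) : String × String × String × String :=
  let r := pvLoopA (PySem.Chars.splitlines device_output.toList) "Ok".toList [] false []
  if r.1 ≠ "Ok".toList then
    (String.ofList "Failed".toList, String.ofList "Half-duplex interfaces found".toList, String.ofList [], String.ofList r.2)
  else
    (String.ofList r.1, String.ofList [], String.ofList [], String.ofList r.2)

-- ===== PORT B =====
def pvFlush (blocks : List (List Char × List (List Char)))
    (cur : Option (List Char × List (List Char))) : List (List Char × List (List Char)) :=
  match cur with
  | none => blocks
  | some b => blocks ++ [b]

-- pass 1: segment the lines into (interface name, indented detail lines) blocks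
def pvPass1 : List (List Char) → Option (List Char × List (List Char)) →
    List (List Char × List (List Char)) → List (List Char × List (List Char))
  | [], cur, blocks => pvFlush blocks cur
  | i :: rest, cur, blocks =>
    if PySem.Chars.isIn pvProto i then
      pvPass1 rest (some ((PySem.Chars.splitOn i [' ']).headD [], [])) (pvFlush blocks cur)
    else
      match cur with
      | some (n, ls) =>
        if PySem.Chars.startswith i [' '] then pvPass1 rest (some (n, ls ++ [i])) blocks
        else pvPass1 rest none (blocks ++ [(n, ls)])
      | none => pvPass1 rest none blocks

-- pass 2 (the comprehension): one message per half-duplex detail line of a block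
def pvMsgsOfBlock (b : List Char × List (List Char)) : List (List Char) :=
  (b.2.filter (fun l => PySem.Chars.isIn pvHalf l)).map (fun _ => b.1 ++ pvSuffix)

def function_alt (device_output : String) : String × String × String × String :=
  let blocks := pvPass1 (PySem.Chars.splitlines device_output.toList) none []
  let messages := blocks.flatMap pvMsgsOfBlock
  if messages = [] then
    (String.ofList "Ok".toList, String.ofList [], String.ofList [], String.ofList [])
  else
    (String.ofList "Failed".toList, String.ofList "Half-duplex interfaces found".toList, String.ofList [],
      String.ofList (PySem.Chars.join pvCRLF messages))

-- ===== PRECONDITION & SPEC =====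
def Spec_function (device_output : String) (out : String × String × String × String) : Prop := out = function_alt device_output
instance (device_output : String) (out : String × String × String × String) : Decidable (Spec_function device_output out) := by unfold Spec_function; infer_instance

-- ===== CLAIM (what is proved, stated in full; the proofs are below) =====
def Claim_equal_function : Prop := ∀ (device_output : String), Dom_function device_output → Spec_function device_output (function device_output)

-- ===== LEMMAS AND PROOFS =====

-- semantic message list produced while scanning `lines` with readiness flag `rdy` and current name
def pvMsgs : List (List Char) → Bool → List Char → List (List Char)
  | [], _, _ => []
  | i :: rest, rdy, name =>
    if PySem.Chars.isIn pvProto i then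
      pvMsgs rest true ((PySem.Chars.splitOn i [' ']).headD [])
    else if PySem.Chars.startswith i [' '] && rdy then
      (if PySem.Chars.isIn pvHalf i then [name ++ pvSuffix] else []) ++ pvMsgs rest rdy name
    else
      pvMsgs rest false name

def pvStep (s m : List Char) : List Char := if s = [] then m else s ++ pvCRLF ++ m

def pvTail : List (List Char) → List Char
  | [] => []
  | m :: ms => pvCRLF ++ m ++ pvTail ms

theorem pvMsgs_false_indep (lines : List (List Char)) (n n' : List Char) :
    pvMsgs lines false n = pvMsgs lines false n' := by
  induction lines generalizing n n' with
  | nil => rfl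
  | cons i rest ih =>
    by_cases h : PySem.Chars.isIn pvProto i = true
    · simp only [pvMsgs, if_pos h]
    · simp only [pvMsgs, if_neg h, Bool.and_false, Bool.false_eq_true, if_false]
      exact ih n n'

theorem pvLoopA_spec (lines : List (List Char)) (valid spurious : List Char) (rdy : Bool)
    (name : List Char) :
    pvLoopA lines valid spurious rdy name =
      ((if pvMsgs lines rdy name = [] then valid else "Failed".toList),
        (pvMsgs lines rdy name).foldl pvStep spurious) := by
  induction lines generalizing valid spurious rdy name with
  | nil => simp [pvLoopA, pvMsgs]
  | cons i rest ih =>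
    by_cases h1 : PySem.Chars.isIn pvProto i = true
    · simp only [pvLoopA, pvMsgs, if_pos h1]
      exact ih ..
    by_cases h2 : (PySem.Chars.startswith i [' '] && rdy) = true
    · by_cases h3 : PySem.Chars.isIn pvHalf i = true
      · simp only [pvLoopA, pvMsgs, if_neg h1, if_pos h2, if_pos h3]
        rw [ih]
        simp only [List.singleton_append, List.foldl_cons, List.cons_ne_nil, if_false, ite_self,
          pvStep]
        simp [List.append_assoc]
      · simp only [pvLoopA, pvMsgs, if_neg h1, if_pos h2, if_neg h3, List.nil_append]
        exact ih ..
    · simp only [pvLoopA, pvMsgs, if_neg h1, if_neg h2]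
      exact ih ..

theorem pvPass1_spec (lines : List (List Char)) (cur : Option (List Char × List (List Char)))
    (blocks : List (List Char × List (List Char))) :
    (pvPass1 lines cur blocks).flatMap pvMsgsOfBlock =
      blocks.flatMap pvMsgsOfBlock ++
        (match cur with
          | some (n, ls) => pvMsgsOfBlock (n, ls) ++ pvMsgs lines true n
          | none => pvMsgs lines false []) := by
  induction lines generalizing cur blocks with
  | nil =>
    cases cur with
    | none => simp [pvPass1, pvFlush, pvMsgs]
    | some b => cases b; simp [pvPass1, pvFlush, pvMsgs]
  | cons i rest ih =>
    by_cases h1 : PySem.Chars.isIn pvProto i = true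
    · cases cur with
      | none =>
        simp only [pvPass1, pvMsgs, if_pos h1, pvFlush]
        rw [ih]
        simp [pvMsgsOfBlock]
      | some b =>
        obtain ⟨n, ls⟩ := b
        simp only [pvPass1, pvMsgs, if_pos h1, pvFlush]
        rw [ih]
        simp [pvMsgsOfBlock]
    · cases cur with
      | none =>
        simp only [pvPass1, pvMsgs, if_neg h1, Bool.and_false, Bool.false_eq_true, if_false]
        exact ih ..
      | some b =>
        obtain ⟨n, ls⟩ := b
        by_cases h2 : PySem.Chars.startswith i [' '] = true
        · simp only [pvPass1, pvMsgs, if_neg h1, Bool.and_true, if_pos h2]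
          rw [ih]
          by_cases h3 : PySem.Chars.isIn pvHalf i = true <;>
            simp [pvMsgsOfBlock, List.filter_append, h3, List.append_assoc]
        · simp only [pvPass1, pvMsgs, if_neg h1, Bool.and_true, if_neg h2]
          rw [ih]
          rw [pvMsgs_false_indep rest [] n]
          simp

theorem pvMsgs_ne_nil (lines : List (List Char)) (rdy : Bool) (name : List Char) :
    ∀ m ∈ pvMsgs lines rdy name, m ≠ [] := by
  induction lines generalizing rdy name with
  | nil => simp [pvMsgs]
  | cons i rest ih =>
    intro m hm
    by_cases h1 : PySem.Chars.isIn pvProto i = true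
    · rw [pvMsgs, if_pos h1] at hm
      exact ih _ _ m hm
    by_cases h2 : (PySem.Chars.startswith i [' '] && rdy) = true
    · rw [pvMsgs, if_neg h1, if_pos h2] at hm
      rcases List.mem_append.mp hm with h | h
      · by_cases h3 : PySem.Chars.isIn pvHalf i = true
        · rw [if_pos h3] at h
          rcases List.mem_singleton.mp h with rfl
          simp [pvSuffix]
        · rw [if_neg h3] at h; cases h
      · exact ih _ _ m h
    · rw [pvMsgs, if_neg h1, if_neg h2] at hm
      exact ih _ _ m hm

theorem foldl_pvStep_of_ne (M : List (List Char)) (s : List Char) (hs : s ≠ []) :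
    M.foldl pvStep s = s ++ pvTail M := by
  induction M generalizing s with
  | nil => simp [pvTail]
  | cons m ms ih =>
    simp only [List.foldl_cons, pvTail]
    rw [pvStep, if_neg hs, ih _ (by simp [hs])]
    simp [List.append_assoc]

theorem join_eq_pvTail (m : List Char) (ms : List (List Char)) :
    List.intercalate pvCRLF (m :: ms) = m ++ pvTail ms := by
  induction ms generalizing m with
  | nil => simp [pvTail, List.intercalate]
  | cons m' ms' ih =>
    have h : List.intercalate pvCRLF (m :: m' :: ms')
        = m ++ pvCRLF ++ List.intercalate pvCRLF (m' :: ms') := by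
      simp [List.intercalate, List.intersperse]
    rw [h, ih m', pvTail]
    simp [List.append_assoc]

theorem render_eq_join (M : List (List Char)) (h : ∀ m ∈ M, m ≠ []) :
    M.foldl pvStep [] = PySem.Chars.join pvCRLF M := by
  cases M with
  | nil => simp [PySem.Chars.join, List.intercalate]
  | cons m ms =>
    rw [List.foldl_cons, pvStep, if_pos rfl, foldl_pvStep_of_ne ms m (h m (by simp))]
    simp only [PySem.Chars.join]
    exact (join_eq_pvTail m ms).symm

-- ===== VERDICT (by name: the statement is the Claim_ definition above) =====
theorem function_spec : Claim_equal_function := by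
  intro s _
  unfold Spec_function
  simp only [function, function_alt, pvLoopA_spec, pvPass1_spec, List.flatMap_nil,
    List.nil_append]
  by_cases h : pvMsgs (PySem.Chars.splitlines s.toList) false [] = []
  · simp [h]
  · rw [render_eq_join _ (pvMsgs_ne_nil _ false [])]
    simp only [h, ite_false]
    rw [if_pos (by decide : "Failed".toList ≠ "Ok".toList)]
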